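-- pv_equiv track=rewrite | github.com/frkl/trojai-fuzzing-vision | util/perm_inv.py | validate_comps_paired
-- ===== SOURCE A (Python) =====
-- import itertools
--
-- def validate_comps_paired(prefix,suffix,k=2):
--     #Both need to participate
--     #Prefix needs to perfectly split
--     #Solution might not exist
--     n=len(prefix)
--     cfgs=list(itertools.product(*([list(range(k))]*n)))
--     valid_cfgs=[];
--     for c in cfgs:
--         #Check whether all items are present
--         if not len(set(c))==k:
--             continue;
--
--         #Check whether prefix split perfectly
--         m={}
--         valid=True
--         for i in range(len(prefix)):
--             if not prefix[i] in m:
--                 m[prefix[i]]=c[i]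
--             elif m[prefix[i]]!=c[i]:
--                 valid=False
--                 break;
--
--         if not valid:
--             continue;
--
--         valid_cfgs.append(c)
--
--     valid_cfgs=[(prefix,suffix,cfg) for cfg in valid_cfgs]
--     #Try removing duplicates if any?
--
--     return valid_cfgs
-- ===== SOURCE B (Python) =====
-- def validate_comps_paired(prefix, suffix, k=2):
--     # No surjective labelling exists when there are fewer distinct prefix values than labels.
--     if len(set(prefix)) < k:
--         return []
--     # Backtracking over prefix: equal prefix values are forced to share a label,
--     # so we only branch on the first occurrence of each distinct prefix value.
--     def dfs(m, ps):
--         if not ps: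
--             return [()]
--         p = ps[0]
--         rest = ps[1:]
--         if p in m:
--             v = m[p]
--             return [(v,) + t for t in dfs(m, rest)]
--         out = []
--         for v in range(k):
--             m2 = dict(m)
--             m2[p] = v
--             out.extend((v,) + t for t in dfs(m2, rest))
--         return out
--     cfgs = [c for c in dfs({}, list(prefix)) if len(set(c)) == k]
--     return [(prefix, suffix, c) for c in cfgs]
-- ===== Notes on version B (the rewrite author's own statement) =====
-- stated objective: faster
-- what changed: B replaces the brute-force enumeration of all k^n label tuples with a backtracking search that branches only at the first occurrence of each distinct prefix value (forced positions copy the already-assigned label), then filters for surjectivity; A's enumerate-then-check is O(k^n·n) while B is O(k^g·n) for g distinct prefix values.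
import Mathlib
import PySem

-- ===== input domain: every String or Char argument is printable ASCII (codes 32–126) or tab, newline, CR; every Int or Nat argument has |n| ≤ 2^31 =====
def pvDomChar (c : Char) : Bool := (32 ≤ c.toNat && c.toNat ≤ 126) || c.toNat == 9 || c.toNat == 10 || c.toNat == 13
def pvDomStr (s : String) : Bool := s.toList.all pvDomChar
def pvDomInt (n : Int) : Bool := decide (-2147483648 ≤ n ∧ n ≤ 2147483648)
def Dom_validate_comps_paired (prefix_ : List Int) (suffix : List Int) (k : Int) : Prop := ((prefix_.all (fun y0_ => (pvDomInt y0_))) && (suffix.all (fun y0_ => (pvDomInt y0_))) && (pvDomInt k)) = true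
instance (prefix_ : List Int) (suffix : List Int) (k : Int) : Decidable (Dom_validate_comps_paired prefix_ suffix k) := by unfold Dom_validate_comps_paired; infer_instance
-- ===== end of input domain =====

-- B replaces A's enumeration of all k^n label tuples by a backtracking search that
-- branches only at the first occurrence of each distinct prefix value (faster).


-- ===== PORT A =====
-- itertools.product(*([list(range(k))]*n)) : first coordinate varies slowest
def pvProd (k : Int) : Nat → List (List Int)
  | 0 => [[]]
  | n+1 => (PySem.List.pyRange 0 k).flatMap (fun x => (pvProd k n).map (fun t => x :: t))

-- A's inner 'for i in range(len(prefix))' loop over dict m, with the early 'break' as early return.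
-- prefix[i] / c[i] via pyGet? (always in range here, so the IndexError arm is unreachable);
-- m[prefix[i]] via getD 0 (only read under 'prefix[i] in m', so the KeyError case never occurs).
def pvALoop (prefix_ c : List Int) : PySem.Dict Int Int → List Int → Bool
  | _, [] => true
  | m, i :: rest =>
    match PySem.List.pyGet? prefix_ i, PySem.List.pyGet? c i with
    | some p, some ci =>
        if m.contains p = false then pvALoop prefix_ c (m.insert p ci) rest
        else if m.getD p 0 ≠ ci then false
        else pvALoop prefix_ c m rest
    | _, _ => false

def validate_comps_paired (prefix_ : List Int) (suffix : List Int) (k : Int) : List (List Int × List Int × List Int) :=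
  let n := prefix_.length
  let cfgs := pvProd k n
  let valid_cfgs := cfgs.foldl (fun acc c =>
      if ¬(((PySem.Set.ofList c).length : Int) = k) then acc
      else if pvALoop prefix_ c PySem.Dict.empty (PySem.List.pyRange 0 (n : Int)) then acc ++ [c]
      else acc) []
  valid_cfgs.map (fun cfg => (prefix_, suffix, cfg))

-- ===== PORT B =====
-- Source B's dfs: forced positions copy the already-assigned label, fresh prefix values branch over range(k)
def pvDfs (k : Int) : PySem.Dict Int Int → List Int → List (List Int)
  | _, [] => [[]]
  | m, p :: rest =>
    match m.get? p with
    | some v => (pvDfs k m rest).map (fun t => v :: t)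
    | none => (PySem.List.pyRange 0 k).flatMap (fun v =>
        (pvDfs k (m.insert p v) rest).map (fun t => v :: t))

def validate_comps_paired_alt (prefix_ : List Int) (suffix : List Int) (k : Int) : List (List Int × List Int × List Int) :=
  -- no surjective labelling exists when there are fewer distinct prefix values than labels
  if ((PySem.Set.ofList prefix_).length : Int) < k then []
  else
  let cfgs := (pvDfs k PySem.Dict.empty prefix_).filter (fun c => ((PySem.Set.ofList c).length : Int) = k)
  cfgs.map (fun c => (prefix_, suffix, c))

-- ===== PRECONDITION & SPEC =====
def Spec_validate_comps_paired (prefix_ : List Int) (suffix : List Int) (k : Int) (out : List (List Int × List Int × List Int)) : Prop := out = validate_comps_paired_alt prefix_ suffix k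
instance (prefix_ : List Int) (suffix : List Int) (k : Int) (out : List (List Int × List Int × List Int)) : Decidable (Spec_validate_comps_paired prefix_ suffix k out) := by unfold Spec_validate_comps_paired; infer_instance

-- ===== CLAIM (what is proved, stated in full; the proofs are below) =====
def Claim_equal_validate_comps_paired : Prop := ∀ (prefix_ : List Int) (suffix : List Int) (k : Int), Dom_validate_comps_paired prefix_ suffix k → Spec_validate_comps_paired prefix_ suffix k (validate_comps_paired prefix_ suffix k)

-- ===== LEMMAS AND PROOFS =====

-- the consistency check of A, restated structurally over (prefix, c) in parallel
def pvChk : PySem.Dict Int Int → List Int → List Int → Bool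
  | _, [], _ => true
  | m, p :: ps, c :: cs =>
      match m.get? p with
      | none => pvChk (m.insert p c) ps cs
      | some v => if v ≠ c then false else pvChk m ps cs
  | _, _ :: _, [] => false

lemma pvProd_length {k : Int} : ∀ {n : Nat} {c : List Int}, c ∈ pvProd k n → c.length = n := by
  intro n
  induction n with
  | zero => intro c hc; simp [pvProd] at hc; simp [hc]
  | succ n ih =>
    intro c hc
    simp only [pvProd, List.mem_flatMap, List.mem_map] at hc
    obtain ⟨x, -, t, ht, rfl⟩ := hc
    simp [ih ht]

lemma pvFlatMap_if_eq {α β : Type} [DecidableEq α] (l : List α) (v : α) (F : List β)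
    (hnd : l.Nodup) (hv : v ∈ l) :
    (l.flatMap fun x => if x = v then F else []) = F := by
  induction l with
  | nil => cases hv
  | cons a l ih =>
    rcases List.nodup_cons.mp hnd with ⟨ha, hl⟩
    rcases List.mem_cons.mp hv with rfl | hv
    · have hrest : (l.flatMap fun x => if x = v then F else []) = [] := by
        apply List.flatMap_eq_nil_iff.mpr
        intro x hx
        have : x ≠ v := fun h => ha (h ▸ hx)
        simp [this]
      simp [List.flatMap_cons, hrest]
    · have ha' : a ≠ v := fun h => ha (h ▸ hv)
      simp [List.flatMap_cons, ha', ih hl hv]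

-- A's index loop equals the structural check, from position j on
lemma pvALoop_eq_pvChk (prefix_ cs : List Int) (hc : cs.length = prefix_.length) :
    ∀ (d j : Nat) (m : PySem.Dict Int Int), prefix_.length ≤ j + d →
      pvALoop prefix_ cs m (PySem.List.pyRange (j : Int) (prefix_.length : Int)) =
        pvChk m (prefix_.drop j) (cs.drop j) := by
  intro d
  induction d with
  | zero =>
    intro j m hj
    simp only [Nat.add_zero] at hj
    rw [PySem.List.pyRange_one_eq_nil (by exact_mod_cast hj)]
    rw [List.drop_eq_nil_of_le hj, List.drop_eq_nil_of_le (hc ▸ hj)]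
    simp [pvALoop, pvChk]
  | succ d ih =>
    intro j m hj
    by_cases hlt : j < prefix_.length
    · rw [PySem.List.pyRange_one_cons (by exact_mod_cast hlt)]
      have hcl : j < cs.length := hc ▸ hlt
      rw [List.drop_eq_getElem_cons hlt, List.drop_eq_getElem_cons hcl]
      have hp : PySem.List.pyGet? prefix_ (j : Int) = some (prefix_[j]'hlt) := by
        rw [PySem.List.pyGet?_natCast]; exact List.getElem?_eq_getElem hlt
      have hcg : PySem.List.pyGet? cs (j : Int) = some (cs[j]'hcl) := by
        rw [PySem.List.pyGet?_natCast]; exact List.getElem?_eq_getElem hcl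
      have hcast : (j : Int) + 1 = ((j + 1 : Nat) : Int) := by push_cast; ring
      simp only [pvALoop, hp, hcg, hcast]
      cases hget : m.get? prefix_[j] with
      | none =>
        have hcont : m.contains prefix_[j] = false :=
          (PySem.Dict.get?_eq_none_iff_contains m _).mp hget
        simp only [hcont, if_true, pvChk, hget]
        exact ih (j + 1) _ (by omega)
      | some v =>
        have hcont : m.contains prefix_[j] = true := by
          rw [PySem.Dict.contains_eq_isSome_get?, hget]; rfl
        have hgd : m.getD prefix_[j] 0 = v := PySem.Dict.getD_of_get?_eq_some m 0 hget
        by_cases hv : v = cs[j]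
        · have hrec := ih (j + 1) m (by omega)
          simp only [pvChk, hget, hcont, Bool.true_eq_false, if_false, hgd, hv, ne_eq,
            not_true_eq_false, Bool.false_eq_true]
          exact hrec
        · simp [pvChk, hget, hcont, hgd, hv]
    · rw [Nat.not_lt] at hlt
      rw [PySem.List.pyRange_one_eq_nil (by exact_mod_cast hlt)]
      rw [List.drop_eq_nil_of_le hlt, List.drop_eq_nil_of_le (hc ▸ hlt)]
      simp [pvALoop, pvChk]

-- the backtracking search generates exactly the consistent tuples, in product order
lemma pvDfs_eq_filter (k : Int) :
    ∀ (ps : List Int) (m : PySem.Dict Int Int),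
      (∀ p v, m.get? p = some v → 0 ≤ v ∧ v < k) →
      pvDfs k m ps = (pvProd k ps.length).filter (pvChk m ps) := by
  intro ps
  induction ps with
  | nil => intro m _; simp [pvDfs, pvProd, pvChk]
  | cons p ps ih =>
    intro m hm
    cases hget : m.get? p with
    | some v =>
      have hv : 0 ≤ v ∧ v < k := hm p v hget
      have hvmem : v ∈ PySem.List.pyRange 0 k := PySem.List.mem_pyRange_one.mpr hv
      simp only [pvDfs, hget, List.length_cons, pvProd, List.filter_flatMap, List.filter_map]
      have hstep : ∀ x : Int,
          List.map (fun t => x :: t)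
            (List.filter ((pvChk m (p :: ps)) ∘ (fun t => x :: t)) (pvProd k ps.length)) =
          (if x = v then List.map (fun t => v :: t) (List.filter (pvChk m ps) (pvProd k ps.length)) else []) := by
        intro x
        by_cases hx : x = v
        · subst hx
          rw [if_pos rfl]
          congr 1
          apply List.filter_congr
          intro t _
          simp [pvChk, hget, Function.comp]
        · rw [if_neg hx]
          have hne : v ≠ x := fun h => hx h.symm
          have hnil : List.filter ((pvChk m (p :: ps)) ∘ fun t => x :: t) (pvProd k ps.length) = [] := by
            apply List.filter_eq_nil_iff.mpr
            intro t _
            simp [Function.comp, pvChk, hget, hne]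
          rw [hnil]
          rfl
      rw [List.flatMap_congr (fun x _ => hstep x)]
      rw [pvFlatMap_if_eq _ v _ (PySem.List.nodup_pyRange_one 0 k) hvmem]
      rw [ih m hm]
    | none =>
      simp only [pvDfs, hget, List.length_cons, pvProd, List.filter_flatMap, List.filter_map]
      apply List.flatMap_congr
      intro x hx
      have hx' : 0 ≤ x ∧ x < k := PySem.List.mem_pyRange_one.mp hx
      have hm' : ∀ q w, (m.insert p x).get? q = some w → 0 ≤ w ∧ w < k := by
        intro q w hq
        rw [PySem.Dict.get?_insert] at hq
        by_cases hqp : q = p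
        · simp [hqp] at hq; omega
        · exact hm q w (by simpa [hqp] using hq)
      rw [ih (m.insert p x) hm']
      congr 1
      apply List.filter_congr
      intro t _
      simp [pvChk, hget, Function.comp]

-- set(xs) has as many elements as xs.toFinset
lemma pvSetLen (xs : List Int) : (PySem.Set.ofList xs).length = xs.toFinset.card := by
  have hnd : (PySem.Set.ofList xs).Nodup := PySem.Set.nodup_ofList xs
  rw [← List.toFinset_card_of_nodup hnd]
  congr 1
  ext y
  simp [PySem.Set.mem_ofList]

-- every tuple produced by the search uses at most (#assigned values + #fresh prefix groups) distinct values
lemma pvDfs_distinct_bound (k : Int) :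
    ∀ (ps : List Int) (m : PySem.Dict Int Int) (c : List Int), c ∈ pvDfs k m ps →
      (c.toFinset ∪ m.values.toFinset).card ≤ m.size + (ps.toFinset \ m.keys.toFinset).card := by
  intro ps
  induction ps with
  | nil =>
    intro m c hc
    simp only [pvDfs, List.mem_singleton] at hc
    subst hc
    simp only [List.toFinset_nil, Finset.empty_union]
    calc m.values.toFinset.card ≤ m.values.length := List.toFinset_card_le _
      _ = m.size := by simp [PySem.Dict.values, PySem.Dict.size]
      _ ≤ _ := Nat.le_add_right _ _
  | cons p ps ih =>
    intro m c hc
    cases hget : m.get? p with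
    | some v =>
      simp only [pvDfs, hget, List.mem_map] at hc
      obtain ⟨t, ht, rfl⟩ := hc
      have hvmem : v ∈ m.values := by
        have := PySem.Dict.mem_items_of_get?_eq_some m hget
        simp only [PySem.Dict.values]
        exact List.mem_map.mpr ⟨(p, v), this, rfl⟩
      have hpk : p ∈ m.keys := by
        have hcont : m.contains p = true := by
          rw [PySem.Dict.contains_eq_isSome_get?, hget]; rfl
        exact (PySem.Dict.contains_iff_mem_keys m p).mp hcont
      have hL : (v :: t).toFinset ∪ m.values.toFinset = t.toFinset ∪ m.values.toFinset := by
        simp only [List.toFinset_cons]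
        rw [Finset.insert_union]
        exact Finset.insert_eq_self.mpr (Finset.mem_union_right _ (List.mem_toFinset.mpr hvmem))
      have hR : (p :: ps).toFinset \ m.keys.toFinset = ps.toFinset \ m.keys.toFinset := by
        simp only [List.toFinset_cons]
        exact Finset.insert_sdiff_of_mem _ (List.mem_toFinset.mpr hpk)
      rw [hL, hR]
      exact ih m t ht
    | none =>
      simp only [pvDfs, hget, List.mem_flatMap, List.mem_map] at hc
      obtain ⟨x, -, t, ht, rfl⟩ := hc
      have hcont : m.contains p = false := (PySem.Dict.get?_eq_none_iff_contains m p).mp hget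
      have hitems : (m.insert p x).items = m.items ++ [(p, x)] :=
        PySem.Dict.items_insert_of_not_contains m x hcont
      have hkeys : (m.insert p x).keys = m.keys ++ [p] := by
        simp [PySem.Dict.keys, hitems]
      have hvals : (m.insert p x).values = m.values ++ [x] := by
        simp [PySem.Dict.values, hitems]
      have hsize : (m.insert p x).size = m.size + 1 := by
        simp [PySem.Dict.size, hitems]
      have hpk : p ∉ m.keys.toFinset := by
        intro hp
        exact absurd ((PySem.Dict.contains_iff_mem_keys m p).mpr (List.mem_toFinset.mp hp))
          (by simp [hcont])
      have hsub : (x :: t).toFinset ∪ m.values.toFinset ⊆ t.toFinset ∪ (m.insert p x).values.toFinset := by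
        rw [hvals]
        intro y hy
        rcases Finset.mem_union.mp hy with hy | hy
        · rcases List.mem_cons.mp (List.mem_toFinset.mp hy) with rfl | hy
          · exact Finset.mem_union_right _ (by simp)
          · exact Finset.mem_union_left _ (List.mem_toFinset.mpr hy)
        · exact Finset.mem_union_right _ (by simp_all)
      have hbound := ih (m.insert p x) t ht
      have hcard : ((p :: ps).toFinset \ m.keys.toFinset).card =
          (ps.toFinset \ (m.insert p x).keys.toFinset).card + 1 := by
        rw [hkeys]
        have hk2 : (m.keys ++ [p]).toFinset = insert p m.keys.toFinset := by
          ext y; simp [or_comm]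
        rw [hk2, List.toFinset_cons, Finset.insert_sdiff_of_notMem _ hpk, Finset.sdiff_insert]
        by_cases hp : p ∈ ps.toFinset \ m.keys.toFinset
        · rw [Finset.insert_eq_self.mpr hp, Finset.card_erase_of_mem hp]
          have := Finset.card_pos.mpr ⟨p, hp⟩
          omega
        · rw [Finset.card_insert_of_notMem hp, Finset.erase_eq_of_notMem hp]
      calc ((x :: t).toFinset ∪ m.values.toFinset).card
          ≤ (t.toFinset ∪ (m.insert p x).values.toFinset).card := Finset.card_le_card hsub
        _ ≤ (m.insert p x).size + (ps.toFinset \ (m.insert p x).keys.toFinset).card := hbound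
        _ ≤ m.size + ((p :: ps).toFinset \ m.keys.toFinset).card := by rw [hsize, hcard]; omega

-- ===== VERDICT (by name: the statement is the Claim_ definition above) =====
theorem validate_comps_paired_spec : Claim_equal_validate_comps_paired := by
  unfold Claim_equal_validate_comps_paired
  intro prefix_ suffix k _dom
  unfold Spec_validate_comps_paired
  unfold validate_comps_paired validate_comps_paired_alt
  simp only []
  have hfun : (fun (acc : List (List Int)) (c : List Int) =>
      if ¬(((PySem.Set.ofList c).length : Int) = k) then acc
      else if pvALoop prefix_ c PySem.Dict.empty (PySem.List.pyRange 0 (prefix_.length : Int)) then acc ++ [c]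
      else acc) =
      (fun acc c =>
        if (decide (((PySem.Set.ofList c).length : Int) = k) &&
            pvALoop prefix_ c PySem.Dict.empty (PySem.List.pyRange 0 (prefix_.length : Int))) = true
        then acc ++ [id c] else acc) := by
    funext acc c
    by_cases h1 : ((PySem.Set.ofList c).length : Int) = k <;>
      by_cases h2 : pvALoop prefix_ c PySem.Dict.empty (PySem.List.pyRange 0 (prefix_.length : Int)) = true <;>
      simp [h1, h2]
  rw [hfun, PySem.List.foldl_append_if, List.map_id, List.nil_append]
  have hdfs := pvDfs_eq_filter k prefix_ PySem.Dict.empty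
    (by intro p v h; rw [PySem.Dict.get?_empty] at h; cases h)
  have haloop : ∀ c ∈ pvProd k prefix_.length,
      pvALoop prefix_ c PySem.Dict.empty (PySem.List.pyRange 0 (prefix_.length : Int)) =
        pvChk PySem.Dict.empty prefix_ c := by
    intro c hc
    have hlen : c.length = prefix_.length := pvProd_length hc
    have h0 := pvALoop_eq_pvChk prefix_ c hlen prefix_.length 0 PySem.Dict.empty (by omega)
    simpa using h0
  by_cases hg : ((PySem.Set.ofList prefix_).length : Int) < k
  · rw [if_pos hg]
    rw [List.map_eq_nil_iff]
    apply List.filter_eq_nil_iff.mpr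
    intro c hc hpred
    rw [haloop c hc, Bool.and_eq_true, decide_eq_true_iff] at hpred
    obtain ⟨hsurj, hchk⟩ := hpred
    have hmem : c ∈ pvDfs k PySem.Dict.empty prefix_ := by
      rw [hdfs]
      exact List.mem_filter.mpr ⟨hc, hchk⟩
    have hb := pvDfs_distinct_bound k prefix_ PySem.Dict.empty c hmem
    have hvals : (PySem.Dict.empty : PySem.Dict Int Int).values = [] := rfl
    have hkeys : (PySem.Dict.empty : PySem.Dict Int Int).keys = [] := rfl
    have hsz : (PySem.Dict.empty : PySem.Dict Int Int).size = 0 := rfl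
    rw [hvals, hkeys, hsz] at hb
    simp only [List.toFinset_nil, Finset.union_empty, Finset.sdiff_empty, Nat.zero_add] at hb
    rw [pvSetLen] at hsurj hg
    omega
  · rw [if_neg hg]
    rw [hdfs, List.filter_filter]
    congr 1
    apply List.filter_congr
    intro c hc
    rw [haloop c hc]
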